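-- pv_equiv track=rewrite | github.com/Nareeek/Codesignal_tasks | hashMap (2).py | hashMap
-- ===== SOURCE A (Python) =====
-- def insert(value: list, dic: dict):
--     dic[value[0]] = value[1]
--     return
--
-- def addToValue(value: list, dic: dict):
--     digit = value[0]
--     return {k: v + digit for (k, v) in dic.items()}
--
-- def addToKey(value: list, dic: dict):
--     digit = value[0]
--     return {k + digit: v for (k, v) in dic.items()}
--
-- def get(value: list, dic: dict):
--     digit = value[0]
--     return dic[digit]
--
-- def hashMap(queryType, query):
--     d = {}
--     get_sum = 0
--     for i in range(len(queryType)):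
--         if queryType[i] == "insert":
--             insert(query[i], d)
--         elif queryType[i] == "addToValue":
--             d = addToValue(query[i], d)
--         elif queryType[i] == "addToKey":
--             d = addToKey(query[i], d)
--         elif queryType[i] == "get":
--             get_sum += get(query[i], d)
--
--     return get_sum
-- ===== SOURCE B (Python) =====
-- def hashMap(queryType, query):
--     # Lazy global key/value offsets: never rebuild the dict.
--     d = {}
--     ko = 0  # amount added to every key so far
--     vo = 0  # amount added to every value so far
--     s = 0
--     for op, val in zip(queryType, query):
--         if op == "insert":
--             d[val[0] - ko] = val[1] - vo
--         elif op == "addToValue":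
--             vo += val[0]
--         elif op == "addToKey":
--             ko += val[0]
--         elif op == "get":
--             s += d[val[0] - ko] + vo
--     return s
-- ===== Notes on version B (the rewrite author's own statement) =====
-- stated objective: alternative
-- what changed: B never rebuilds the dict: it keeps lazy global key/value offsets, stores entries rebased by the current offsets, and makes addToKey/addToValue single offset bumps, adding the value offset back on get.
import Mathlib
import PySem

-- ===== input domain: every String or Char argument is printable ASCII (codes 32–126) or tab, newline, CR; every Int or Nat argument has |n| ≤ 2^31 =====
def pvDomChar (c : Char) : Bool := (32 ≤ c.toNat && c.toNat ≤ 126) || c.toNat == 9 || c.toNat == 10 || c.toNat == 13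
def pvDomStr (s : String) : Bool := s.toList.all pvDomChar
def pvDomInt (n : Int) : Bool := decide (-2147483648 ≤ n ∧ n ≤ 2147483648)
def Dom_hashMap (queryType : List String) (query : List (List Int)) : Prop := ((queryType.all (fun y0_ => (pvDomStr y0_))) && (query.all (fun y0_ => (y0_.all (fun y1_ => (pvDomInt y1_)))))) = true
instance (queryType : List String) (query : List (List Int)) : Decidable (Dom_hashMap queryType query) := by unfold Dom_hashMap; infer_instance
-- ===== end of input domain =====

-- B replaces A's per-query dict rebuilds by lazy global key/value offsets (entries stored rebased),
-- so addToKey/addToValue only bump an offset; objective: alternative. Equivalence is about the return value.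

-- ===== PORT A =====
-- The Option state is `none` exactly where the Python raises (IndexError/KeyError); Pre_ excludes those inputs.
def pvExtractA : Option (PySem.Dict Int Int × Int) → Int
  | some (_, s) => s
  | none => 0

-- for i in range(len(queryType)): dispatch on queryType[i], reading query[i]; addToValue/addToKey rebuild the dict
def pvLoopA (q : List (List Int)) : Nat → List String → Option (PySem.Dict Int Int × Int) → Option (PySem.Dict Int Int × Int)
  | _, [], st => st
  | i, op :: rest, st =>
      pvLoopA q (i + 1) rest
        (match st with
         | none => none
         | some (d, s) =>
           if op = "insert" then
             match PySem.List.pyGet? q (i : Int) with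
             | none => none
             | some v =>
               match PySem.List.pyGet? v 0, PySem.List.pyGet? v 1 with
               | some k, some w => some (d.insert k w, s)
               | _, _ => none
           else if op = "addToValue" then
             match PySem.List.pyGet? q (i : Int) with
             | none => none
             | some v =>
               match PySem.List.pyGet? v 0 with
               | none => none
               | some dg => some (PySem.Dict.ofList (d.items.map (fun kv => (kv.1, kv.2 + dg))), s)
           else if op = "addToKey" then
             match PySem.List.pyGet? q (i : Int) with
             | none => none
             | some v =>
               match PySem.List.pyGet? v 0 with
               | none => none
               | some dg => some (PySem.Dict.ofList (d.items.map (fun kv => (kv.1 + dg, kv.2))), s)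
           else if op = "get" then
             match PySem.List.pyGet? q (i : Int) with
             | none => none
             | some v =>
               match PySem.List.pyGet? v 0 with
               | none => none
               | some dg =>
                 match d.get? dg with
                 | none => none
                 | some x => some (d, s + x)
           else some (d, s))

def hashMap (queryType : List String) (query : List (List Int)) : Int :=
  pvExtractA (pvLoopA query 0 queryType (some (PySem.Dict.empty, 0)))

-- ===== PORT B =====
def pvExtractB : Option (PySem.Dict Int Int × Int × Int × Int) → Int
  | some (_, _, _, s) => s
  | none => 0

-- for op, val in zip(queryType, query): lazy offsets ko/vo; dict holds rebased keys/values
def pvLoopB : List (String × List Int) → Option (PySem.Dict Int Int × Int × Int × Int) → Option (PySem.Dict Int Int × Int × Int × Int)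
  | [], st => st
  | (op, v) :: rest, st =>
      pvLoopB rest
        (match st with
         | none => none
         | some (d, ko, vo, s) =>
           if op = "insert" then
             match PySem.List.pyGet? v 0, PySem.List.pyGet? v 1 with
             | some k, some w => some (d.insert (k - ko) (w - vo), ko, vo, s)
             | _, _ => none
           else if op = "addToValue" then
             match PySem.List.pyGet? v 0 with
             | none => none
             | some dg => some (d, ko, vo + dg, s)
           else if op = "addToKey" then
             match PySem.List.pyGet? v 0 with
             | none => none
             | some dg => some (d, ko + dg, vo, s)
           else if op = "get" then
             match PySem.List.pyGet? v 0 with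
             | none => none
             | some k =>
               match d.get? (k - ko) with
               | none => none
               | some x => some (d, ko, vo, s + x + vo)
           else some (d, ko, vo, s))

def hashMap_alt (queryType : List String) (query : List (List Int)) : Int :=
  pvExtractB (pvLoopB (queryType.zip query) (some (PySem.Dict.empty, 0, 0, 0)))

-- ===== PRECONDITION & SPEC =====
-- total addToKey shift applied before step n (reads only the input)
def pvKoSum (queryType : List String) (query : List (List Int)) (n : Nat) : Int :=
  ((List.range n).map (fun t => if queryType.getD t "" = "addToKey" then (query.getD t []).getD 0 0 else 0)).sum

-- Pre_ excludes exactly the inputs on which A raises: a recognized op whose query[i] is missing/too short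
-- (IndexError), or a get whose key was never inserted (KeyError).
def Pre_hashMap (queryType : List String) (query : List (List Int)) : Prop :=
  ∀ i < queryType.length,
    (queryType.getD i "" = "insert" → i < query.length ∧ 2 ≤ (query.getD i []).length) ∧
    ((queryType.getD i "" = "addToValue" ∨ queryType.getD i "" = "addToKey" ∨ queryType.getD i "" = "get") →
       i < query.length ∧ 1 ≤ (query.getD i []).length) ∧
    (queryType.getD i "" = "get" →
       ∃ j < i, queryType.getD j "" = "insert" ∧
         (query.getD j []).getD 0 0 - pvKoSum queryType query j
           = (query.getD i []).getD 0 0 - pvKoSum queryType query i)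

instance (queryType : List String) (query : List (List Int)) : Decidable (Pre_hashMap queryType query) := by
  unfold Pre_hashMap; infer_instance

def pvWitness_hashMap : List String × List (List Int) := (["insert", "addToKey", "get"], [[1, 2], [5], [6]])

def Spec_hashMap (queryType : List String) (query : List (List Int)) (out : Int) : Prop := out = hashMap_alt queryType query
instance (queryType : List String) (query : List (List Int)) (out : Int) : Decidable (Spec_hashMap queryType query out) := by unfold Spec_hashMap; infer_instance

-- ===== CLAIM (what is proved, stated in full; the proofs are below) =====
def Claim_equal_hashMap : Prop := ∀ (queryType : List String) (query : List (List Int)), Dom_hashMap queryType query → Pre_hashMap queryType query → Spec_hashMap queryType query (hashMap queryType query)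

-- ===== LEMMAS AND PROOFS =====

-- A's dict after the prefix is B's dict with both offsets applied to every entry, in order
def pvF (ko vo : Int) (p : Int × Int) : Int × Int := (p.1 + ko, p.2 + vo)

def pvMapD (ko vo : Int) (d : PySem.Dict Int Int) : PySem.Dict Int Int :=
  PySem.Dict.mk (d.items.map (pvF ko vo))

theorem pvLoopA_none (q : List (List Int)) (rest : List String) (i : Nat) :
    pvLoopA q i rest none = none := by
  induction rest generalizing i with
  | nil => rfl
  | cons op rest ih => simp [pvLoopA, ih]

theorem pvLoopB_none (rest : List (String × List Int)) :
    pvLoopB rest none = none := by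
  induction rest with
  | nil => rfl
  | cons p rest ih => obtain ⟨op, v⟩ := p; simp [pvLoopB, ih]

theorem pvGet_mapD (d : PySem.Dict Int Int) (ko vo k : Int) :
    (pvMapD ko vo d).get? k = (d.get? (k - ko)).map (· + vo) := by
  obtain ⟨l⟩ := d
  induction l with
  | nil => rfl
  | cons p l ih =>
    obtain ⟨a, b⟩ := p
    by_cases h : a = k - ko
    · have h2 : a + ko = k := by omega
      simp [pvMapD, pvF, PySem.Dict.get?_mk_cons, h, h2]
    · have h2 : ¬ a + ko = k := by omega
      simpa [pvMapD, pvF, PySem.Dict.get?_mk_cons, h, h2] using ih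

theorem pvContains_mapD (d : PySem.Dict Int Int) (ko vo k : Int) :
    (pvMapD ko vo d).contains k = d.contains (k - ko) := by
  rw [PySem.Dict.contains_eq_isSome_get?, PySem.Dict.contains_eq_isSome_get?, pvGet_mapD]
  cases d.get? (k - ko) <;> rfl

theorem pvInsert_mapD (d : PySem.Dict Int Int) (ko vo k w : Int) :
    (pvMapD ko vo d).insert k w = pvMapD ko vo (d.insert (k - ko) (w - vo)) := by
  apply PySem.Dict.ext
  rw [show (pvMapD ko vo (d.insert (k - ko) (w - vo))).items
        = (d.insert (k - ko) (w - vo)).items.map (pvF ko vo) from rfl]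
  rw [PySem.Dict.items_insert, PySem.Dict.items_insert, pvContains_mapD]
  by_cases hc : d.contains (k - ko)
  · simp only [hc, if_true]
    rw [show (pvMapD ko vo d).items = d.items.map (pvF ko vo) from rfl]
    simp only [List.map_map]
    apply List.map_congr_left
    intro p _
    by_cases hp : p.1 = k - ko
    · have : p.1 + ko = k := by omega
      simp [pvF, Function.comp, hp, this, show k - ko + ko = k by ring,
        show w - vo + vo = w by ring]
    · have h2 : ¬ p.1 + ko = k := by omega
      simp [pvF, Function.comp, hp, h2]
  · simp only [hc, if_false]
    rw [show (pvMapD ko vo d).items = d.items.map (pvF ko vo) from rfl]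
    simp [pvF, show k - ko + ko = k by ring, show w - vo + vo = w by ring]

theorem pvOfList_nodup (l : List (Int × Int)) (h : (l.map Prod.fst).Nodup) :
    PySem.Dict.ofList l = PySem.Dict.mk l := by
  apply PySem.Dict.ext
  have hfresh : ∀ a ∈ l, (PySem.Dict.empty : PySem.Dict Int Int).contains a.1 = false := by
    intro a _; exact PySem.Dict.contains_empty a.1
  have := PySem.Dict.items_foldl_insert_fresh (l := l) (k := Prod.fst) (v := Prod.snd)
    (d := PySem.Dict.empty) hfresh h
  simpa using this

theorem pvNodup_map_fst (l : List (Int × Int)) (ko vo : Int) (h : (l.map Prod.fst).Nodup) :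
    ((l.map (pvF ko vo)).map Prod.fst).Nodup := by
  have : (l.map (pvF ko vo)).map Prod.fst = (l.map Prod.fst).map (fun x => x + ko) := by
    simp [pvF, Function.comp]
  rw [this]
  exact h.map (fun a b hab => by omega)

theorem pvKeys_nodup_iff (d : PySem.Dict Int Int) : d.keys = d.items.map Prod.fst := rfl

-- the main lockstep invariant: A on indices i.. with the rebuilt dict equals B on the zipped tail
theorem pvMain (rest : List String) (q : List (List Int)) :
    ∀ (i : Nat) (d : PySem.Dict Int Int) (ko vo s : Int),
    (d.items.map Prod.fst).Nodup →
    (∀ j, j < rest.length → q.length ≤ i + j →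
        rest.getD j "" ∉ (["insert", "addToValue", "addToKey", "get"] : List String)) →
    pvExtractA (pvLoopA q i rest (some (pvMapD ko vo d, s)))
      = pvExtractB (pvLoopB (rest.zip (q.drop i)) (some (d, ko, vo, s))) := by
  induction rest with
  | nil => intro i d ko vo s _ _; rfl
  | cons op rest ih =>
    intro i d ko vo s hnd htail
    have htail' : ∀ j, j < rest.length → q.length ≤ (i + 1) + j →
        rest.getD j "" ∉ (["insert", "addToValue", "addToKey", "get"] : List String) := by
      intro j hj hlen
      have := htail (j + 1) (by simpa using Nat.succ_lt_succ hj) (by omega)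
      simpa [List.getD_cons_succ] using this
    by_cases hi : i < q.length
    · have hdrop : q.drop i = q[i] :: q.drop (i + 1) := List.drop_eq_getElem_cons hi
      have hq : PySem.List.pyGet? q (i : Int) = some q[i] := by
        simp [PySem.List.pyGet?_natCast, List.getElem?_eq_getElem hi]
      rw [hdrop]
      by_cases h1 : op = "insert"
      · simp only [pvLoopA, pvLoopB, List.zip_cons_cons, h1, if_true, hq]
        rcases h0 : PySem.List.pyGet? q[i] 0 with _ | k
        · simp [h0, pvLoopA_none, pvLoopB_none, pvExtractA, pvExtractB]
        rcases hh1 : PySem.List.pyGet? q[i] 1 with _ | w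
        · simp [h0, hh1, pvLoopA_none, pvLoopB_none, pvExtractA, pvExtractB]
        simp only [h0, hh1]
        rw [pvInsert_mapD]
        rw [← hdrop] at *
        exact ih (i + 1) (d.insert (k - ko) (w - vo)) ko vo s
          (by rw [← pvKeys_nodup_iff]; exact PySem.Dict.nodup_keys_insert _ _ _ hnd) htail'
      by_cases h2 : op = "addToValue"
      · simp only [pvLoopA, pvLoopB, List.zip_cons_cons, h1, h2, if_true, if_false, hq]
        rcases h0 : PySem.List.pyGet? q[i] 0 with _ | dg
        · simp [h0, pvLoopA_none, pvLoopB_none, pvExtractA, pvExtractB]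
        simp only [h0]
        have hmap : (pvMapD ko vo d).items.map (fun kv : Int × Int => (kv.1, kv.2 + dg))
            = d.items.map (pvF ko (vo + dg)) := by
          rw [show (pvMapD ko vo d).items = d.items.map (pvF ko vo) from rfl]
          simp only [List.map_map]
          apply List.map_congr_left
          intro p _
          simp [pvF, Function.comp]; ring
        rw [hmap, pvOfList_nodup _ (pvNodup_map_fst _ _ _ hnd),
          show PySem.Dict.mk (d.items.map (pvF ko (vo + dg))) = pvMapD ko (vo + dg) d from rfl]
        exact ih (i + 1) d ko (vo + dg) s hnd htail'
      by_cases h3 : op = "addToKey"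
      · simp only [pvLoopA, pvLoopB, List.zip_cons_cons, h1, h2, h3, if_true, if_false, hq]
        rcases h0 : PySem.List.pyGet? q[i] 0 with _ | dg
        · simp [h0, pvLoopA_none, pvLoopB_none, pvExtractA, pvExtractB]
        simp only [h0]
        have hmap : (pvMapD ko vo d).items.map (fun kv : Int × Int => (kv.1 + dg, kv.2))
            = d.items.map (pvF (ko + dg) vo) := by
          rw [show (pvMapD ko vo d).items = d.items.map (pvF ko vo) from rfl]
          simp only [List.map_map]
          apply List.map_congr_left
          intro p _
          simp [pvF, Function.comp]; ring
        rw [hmap, pvOfList_nodup _ (pvNodup_map_fst _ _ _ hnd),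
          show PySem.Dict.mk (d.items.map (pvF (ko + dg) vo)) = pvMapD (ko + dg) vo d from rfl]
        exact ih (i + 1) d (ko + dg) vo s hnd htail'
      by_cases h4 : op = "get"
      · simp only [pvLoopA, pvLoopB, List.zip_cons_cons, h1, h2, h3, h4, if_true, if_false, hq]
        rcases h0 : PySem.List.pyGet? q[i] 0 with _ | k
        · simp [h0, pvLoopA_none, pvLoopB_none, pvExtractA, pvExtractB]
        simp only [h0, pvGet_mapD]
        rcases hg : d.get? (k - ko) with _ | x
        · simp [pvLoopA_none, pvLoopB_none, pvExtractA, pvExtractB]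
        simp only [Option.map_some]
        rw [show s + (x + vo) = s + x + vo by ring]
        exact ih (i + 1) d ko vo (s + x + vo) hnd htail'
      · simp only [pvLoopA, pvLoopB, List.zip_cons_cons, h1, h2, h3, h4, if_false]
        exact ih (i + 1) d ko vo s hnd htail'
    · have hdrop : q.drop i = [] := List.drop_eq_nil_of_le (by omega)
      have hop : op ∉ (["insert", "addToValue", "addToKey", "get"] : List String) := by
        have := htail 0 (by simp) (by omega)
        simpa using this
      simp only [List.mem_cons, List.mem_singleton, not_or] at hop
      obtain ⟨h1, h2, h3, h4⟩ := hop
      have hdrop' : q.drop (i + 1) = [] := List.drop_eq_nil_of_le (by omega)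
      have := ih (i + 1) d ko vo s hnd htail'
      rw [hdrop', List.zip_nil_right] at this
      rw [hdrop, List.zip_nil_right]
      simp only [pvLoopA, pvLoopB, h1, h2, h3, h4, if_false] at *
      exact this

-- ===== VERDICT (by name: the statement is the Claim_ definition above) =====
theorem hashMap_spec : Claim_equal_hashMap := by
  intro qt q _ hpre
  unfold Spec_hashMap hashMap hashMap_alt
  have htail : ∀ j, j < qt.length → q.length ≤ 0 + j →
      qt.getD j "" ∉ (["insert", "addToValue", "addToKey", "get"] : List String) := by
    intro j hj hlen hmem
    obtain ⟨c1, c2, _⟩ := hpre j hj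
    simp only [List.mem_cons, List.mem_singleton] at hmem
    rcases hmem with h | h | h | h
    · exact absurd (c1 h).1 (by omega)
    · exact absurd (c2 (Or.inl h)).1 (by omega)
    · exact absurd (c2 (Or.inr (Or.inl h))).1 (by omega)
    · rcases h with h | h
      · exact absurd (c2 (Or.inr (Or.inr h))).1 (by omega)
      · simp at h
  have := pvMain qt q 0 PySem.Dict.empty 0 0 0 (by simp [PySem.Dict.empty]) htail
  rw [show pvMapD 0 0 PySem.Dict.empty = PySem.Dict.empty from rfl] at this
  simpa using this
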